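-- pv_equiv track=rewrite | github.com/JimMcKeown17/streamlit_zazi_izandi_data | new_pages/project_management/letter_progress_detailed.py | check_ta_flag
-- ===== SOURCE A (Python) =====
-- from collections import Counter
--
-- def check_ta_flag(ta_data):
--     """Check if a TA should be flagged for having 3+ groups with same progress_index"""
--     progress_indices = []
--     for group_data in ta_data['groups'].values():
--         progress_indices.append(group_data['progress_index'])
--
--     # Count occurrences of each progress_index
--     progress_counts = Counter(progress_indices)
--
--     # Check if any progress_index appears 3 or more times
--     for count in progress_counts.values():
--         if count >= 3:
--             return True
--     return False
-- ===== SOURCE B (Python) =====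
-- def check_ta_flag(ta_data):
--     """Check if a TA should be flagged for having 3+ groups with same progress_index"""
--     s = sorted(g['progress_index'] for g in ta_data['groups'].values())
--     # a value occurs 3+ times iff, in the sorted order, some element equals
--     # the element two positions later
--     return any(a == c for a, c in zip(s, s[2:]))
-- ===== Notes on version B (the rewrite author's own statement) =====
-- stated objective: alternative
-- what changed: Replaced the explicit collecting loop plus Counter frequency table by a generator-fed sort and a zip scan that flags when some sorted element equals the one two positions later.
import Mathlib
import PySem

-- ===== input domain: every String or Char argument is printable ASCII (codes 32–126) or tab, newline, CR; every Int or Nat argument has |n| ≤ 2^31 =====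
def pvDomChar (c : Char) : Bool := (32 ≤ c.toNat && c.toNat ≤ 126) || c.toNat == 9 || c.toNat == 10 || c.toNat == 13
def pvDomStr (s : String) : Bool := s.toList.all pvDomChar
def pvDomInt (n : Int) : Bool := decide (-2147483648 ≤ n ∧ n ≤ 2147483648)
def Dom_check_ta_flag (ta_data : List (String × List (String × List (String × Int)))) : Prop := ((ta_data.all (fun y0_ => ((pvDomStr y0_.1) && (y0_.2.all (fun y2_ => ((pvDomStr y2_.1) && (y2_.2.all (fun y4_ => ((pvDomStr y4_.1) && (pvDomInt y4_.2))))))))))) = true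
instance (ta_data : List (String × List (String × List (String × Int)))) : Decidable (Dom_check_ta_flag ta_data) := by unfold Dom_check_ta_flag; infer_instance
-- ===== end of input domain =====

-- B replaces A's Counter frequency table by sorting and checking whether any sorted element equals the one two positions later (alternative algorithm, same result).


-- ===== PORT A =====
def check_ta_flag (ta_data : List (String × List (String × List (String × Int)))) : Bool :=
  match (PySem.Dict.ofList ta_data).get? "groups" with
  | none => false  -- Python raises KeyError here; excluded by Pre_
  | some groups =>
    let progress_indices := (PySem.Dict.ofList groups).values.foldl
      (fun acc gd =>
        match (PySem.Dict.ofList gd).get? "progress_index" with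
        | some v => acc ++ [v]
        | none => acc)  -- none = KeyError in Python; excluded by Pre_
      []
    let progress_counts := PySem.Dict.counter progress_indices
    progress_counts.values.any (fun c => 3 ≤ c)

-- ===== PORT B =====
-- any(a == c for a, c in zip(s, s[2:])): B's zip pairs each element with the one
-- two positions later; transliterated as structural recursion over those pairs.
def pvZipGapEq : List Int → Bool
  | a :: b :: c :: rest => a == c || pvZipGapEq (b :: c :: rest)
  | _ => false

def check_ta_flag_alt (ta_data : List (String × List (String × List (String × Int)))) : Bool :=
  -- the generator expression; gd['progress_index'] total via getD (missing key = KeyError, outside Pre_)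
  let s := PySem.List.sorted
    ((PySem.Dict.ofList ((PySem.Dict.ofList ta_data).getD "groups" [])).values.map
      (fun gd => (PySem.Dict.ofList gd).getD "progress_index" 0))
    (fun x => x) false
  pvZipGapEq s

-- ===== PRECONDITION & SPEC =====
-- Pre_ excludes exactly the inputs on which the Python raises KeyError:
-- ta_data without a 'groups' key, or a group dict without a 'progress_index' key.
def Pre_check_ta_flag (ta_data : List (String × List (String × List (String × Int)))) : Prop :=
  (PySem.Dict.ofList ta_data).contains "groups" = true ∧
  ∀ gd ∈ (PySem.Dict.ofList ((PySem.Dict.ofList ta_data).getD "groups" [])).values,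
    (PySem.Dict.ofList gd).contains "progress_index" = true
instance (ta_data : List (String × List (String × List (String × Int)))) : Decidable (Pre_check_ta_flag ta_data) := by unfold Pre_check_ta_flag; infer_instance

def pvWitness_check_ta_flag : (List (String × List (String × List (String × Int)))) :=
  [("groups", [("g1", [("progress_index", 2)]), ("g2", [("progress_index", 2)]), ("g3", [("progress_index", 2)])])]

def Spec_check_ta_flag (ta_data : List (String × List (String × List (String × Int)))) (out : Bool) : Prop := out = check_ta_flag_alt ta_data
instance (ta_data : List (String × List (String × List (String × Int)))) (out : Bool) : Decidable (Spec_check_ta_flag ta_data out) := by unfold Spec_check_ta_flag; infer_instance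

-- ===== CLAIM (what is proved, stated in full; the proofs are below) =====
def Claim_equal_check_ta_flag : Prop := ∀ (ta_data : List (String × List (String × List (String × Int)))), Dom_check_ta_flag ta_data → Pre_check_ta_flag ta_data → Spec_check_ta_flag ta_data (check_ta_flag ta_data)

-- ===== LEMMAS AND PROOFS =====

-- A's append loop over dicts that all contain the key equals B's map with getD
theorem foldl_get_eq_map_getD (vs : List (List (String × Int)))
    (h : ∀ gd ∈ vs, (PySem.Dict.ofList gd).contains "progress_index" = true) :
    ∀ acc : List Int,
    vs.foldl (fun acc gd =>
        match (PySem.Dict.ofList gd).get? "progress_index" with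
        | some v => acc ++ [v]
        | none => acc) acc
      = acc ++ vs.map (fun gd => (PySem.Dict.ofList gd).getD "progress_index" 0) := by
  induction vs with
  | nil => intro acc; simp
  | cons gd t ih =>
    intro acc
    have hc := h gd (List.mem_cons_self)
    rw [PySem.Dict.contains_eq_isSome_get?] at hc
    cases hg : (PySem.Dict.ofList gd).get? "progress_index" with
    | none => rw [hg] at hc; simp at hc
    | some v =>
      have hgd : (PySem.Dict.ofList gd).getD "progress_index" 0 = v :=
        PySem.Dict.getD_of_get?_eq_some _ _ hg
      simp only [List.foldl_cons, hg, List.map_cons, hgd]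
      rw [ih (fun g hg => h g (List.mem_cons_of_mem _ hg)) (acc ++ [v])]
      simp

-- on a sorted list, the gap-2 scan finds exactly the values of multiplicity ≥ 3
theorem pvZipGapEq_sorted : ∀ (s : List Int), s.Pairwise (· ≤ ·) →
    (pvZipGapEq s = true ↔ ∃ v ∈ s, 3 ≤ s.count v) := by
  intro s
  induction s with
  | nil => intro _; simp [pvZipGapEq]
  | cons a t ih =>
    intro hpw
    rw [List.pairwise_cons] at hpw
    cases t with
    | nil => simp [pvZipGapEq]
    | cons b u =>
      cases u with
      | nil =>
        simp only [pvZipGapEq, Bool.false_eq_true, false_iff]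
        rintro ⟨v, hv, hcv⟩
        have h1 : (List.count v [a, b]) ≤ 2 := by
          simp only [List.count_cons, List.count_nil]
          split <;> split <;> omega
        omega
      | cons c r =>
        have hab : a ≤ b := hpw.1 b (List.mem_cons_self)
        have hac : a ≤ c := hpw.1 c (by simp)
        have hpw' := hpw.2
        simp only [pvZipGapEq, Bool.or_eq_true, beq_iff_eq]
        rw [ih hpw']
        constructor
        · rintro (hac' | ⟨v, hv, hcv⟩)
          · have hbc : b ≤ c := (List.pairwise_cons.mp hpw').1 c (List.mem_cons_self)
            have hb : b = a := by omega
            have h1 : (b == a) = true := by simp [hb]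
            have h2 : (c == a) = true := by simp [← hac']
            refine ⟨a, List.mem_cons_self, ?_⟩
            simp only [List.count_cons, h1, h2, beq_self_eq_true, if_true]
            omega
          · refine ⟨v, List.mem_cons_of_mem _ hv, ?_⟩
            rw [List.count_cons]
            split <;> omega
        · rintro ⟨v, hv, hcv⟩
          by_cases hvac : a = c
          · exact Or.inl hvac
          · right
            have hlt : a < c := lt_of_le_of_ne hac hvac
            have hcr : ∀ x ∈ r, c ≤ x := (List.pairwise_cons.mp (List.pairwise_cons.mp hpw').2).1
            have hnot : a ∉ c :: r := by
              intro hm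
              rcases List.mem_cons.mp hm with h | h
              · omega
              · exact absurd (hcr a h) (by omega)
            have hca : (c :: r).count a = 0 := List.count_eq_zero.mpr hnot
            by_cases hvaeq : v = a
            · exfalso
              subst hvaeq
              have h1 : (b :: c :: r).count v = (c :: r).count v + (if (b == v) = true then 1 else 0) :=
                List.count_cons
              have h2 : (v :: b :: c :: r).count v = (b :: c :: r).count v + 1 := by
                rw [List.count_cons]; simp
              rw [hca] at h1
              split at h1 <;> omega
            · have hif : (a == v) = false := by
                simp only [beq_eq_false_iff_ne, ne_eq]
                exact fun h => hvaeq h.symm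
              have hcnt : (a :: b :: c :: r).count v = (b :: c :: r).count v := by
                rw [List.count_cons, hif]; simp
              refine ⟨v, ?_, by omega⟩
              rcases List.mem_cons.mp hv with h | h
              · exact absurd h hvaeq
              · exact h

-- A's counter check equals B's sorted gap-2 scan, on any extracted list
theorem pvCore (l : List Int) :
    (PySem.Dict.counter l).values.any (fun c => 3 ≤ c)
      = pvZipGapEq (PySem.List.sorted l (fun x => x) false) := by
  rw [Bool.eq_iff_iff]
  have hperm : (PySem.List.sorted l (fun x => x) false).Perm l := PySem.List.sorted_perm l (fun x => x) false
  rw [pvZipGapEq_sorted _ (by simpa using PySem.List.sorted_pairwise (xs := l) (key := fun x => x))]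
  have hA : (PySem.Dict.counter l).values = (PySem.Set.ofList l).map (fun k => (l.count k : Int)) := by
    have := PySem.Dict.items_counter (xs := l)
    simp [PySem.Dict.values, this]
  rw [hA, List.any_map, List.any_eq_true]
  constructor
  · rintro ⟨k, hk, hck⟩
    refine ⟨k, (PySem.List.mem_sorted _ _ _ _).mpr ((PySem.Set.mem_ofList _ _).mp hk), ?_⟩
    rw [hperm.count_eq]
    simp at hck
    omega
  · rintro ⟨k, hk, hck⟩
    refine ⟨k, (PySem.Set.mem_ofList _ _).mpr ((PySem.List.mem_sorted _ _ _ _).mp hk), ?_⟩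
    rw [hperm.count_eq] at hck
    simp
    omega

-- ===== VERDICT (by name: the statement is the Claim_ definition above) =====
theorem check_ta_flag_spec : Claim_equal_check_ta_flag := by
  intro ta_data _ hpre
  obtain ⟨hg, hkeys⟩ := hpre
  rw [PySem.Dict.contains_eq_isSome_get?] at hg
  unfold Spec_check_ta_flag check_ta_flag check_ta_flag_alt
  cases hgr : (PySem.Dict.ofList ta_data).get? "groups" with
  | none => rw [hgr] at hg; simp at hg
  | some groups =>
    have hgd : (PySem.Dict.ofList ta_data).getD "groups" [] = groups :=
      PySem.Dict.getD_of_get?_eq_some _ _ hgr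
    rw [hgd] at hkeys ⊢
    simp only
    rw [foldl_get_eq_map_getD _ hkeys []]
    simp only [List.nil_append]
    exact pvCore _
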